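-- pv_equiv track=rewrite | github.com/Coding-Capybara/CodingTestWinner | programmers/118666/c7c4ff.py | solution
-- ===== SOURCE A (Python) =====
-- def score(n):
--     if n == 1:
--         return 3
--     elif n == 2:
--         return 2
--     elif n == 3:
--         return 1
--     elif n == 4:
--         return 0
--     elif n == 5:
--         return -1
--     elif n == 6:
--         return -2
--     elif n == 7:
--         return -3
--
-- def solution(survey, choices):
--     answer = ''
--     RTFCMJAN = [0, 0, 0, 0]
--
--     for i in range(0, len(survey)):
--         if survey[i] == "RT":
--             RTFCMJAN[0] += score(choices[i])
--         elif survey[i] == "TR":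
--             RTFCMJAN[0] -= score(choices[i])
--         elif survey[i] == "CF":
--             RTFCMJAN[1] += score(choices[i])
--         elif survey[i] == "FC":
--             RTFCMJAN[1] -= score(choices[i])
--         elif survey[i] == "JM":
--             RTFCMJAN[2] += score(choices[i])
--         elif survey[i] == "MJ":
--             RTFCMJAN[2] -= score(choices[i])
--         elif survey[i] == "AN":
--             RTFCMJAN[3] += score(choices[i])
--         elif survey[i] == "NA":
--             RTFCMJAN[3] -= score(choices[i])
--
--     if RTFCMJAN[0] >= 0:
--         answer += "R"
--     else:
--         answer += "T"
--     if RTFCMJAN[1] >= 0: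
--         answer += "C"
--     else:
--         answer += "F"
--     if RTFCMJAN[2] >= 0:
--         answer += "J"
--     else:
--         answer += "M"
--     if RTFCMJAN[3] >= 0:
--         answer += "A"
--     else:
--         answer += "N"
--
--     return answer
-- ===== SOURCE B (Python) =====
-- def net(qa, ab, ba):
--     return sum((qa.count((ab, ch)) - qa.count((ba, ch))) * (4 - ch)
--                for ch in range(1, 8))
--
-- def solution(survey, choices):
--     qa = list(zip(survey, choices))
--     answer = ''
--     for ab, ba, pos, neg in (('RT', 'TR', 'R', 'T'), ('CF', 'FC', 'C', 'F'),
--                              ('JM', 'MJ', 'J', 'M'), ('AN', 'NA', 'A', 'N')):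
--         answer += pos if net(qa, ab, ba) >= 0 else neg
--     return answer
-- ===== Notes on version B (the rewrite author's own statement) =====
-- stated objective: alternative
-- what changed: A streams through the questions accumulating four signed per-axis scores via an eight-branch elif chain and a 7-case score() lookup; B never scores items one by one: it zips survey with choices once and, for each axis, computes the net as a closed-form weighted sum of occurrence counts of the 14 possible (code, choice) combinations (count('RT',ch)-count('TR',ch))*(4-ch), then picks the letter by sign.
import Mathlib
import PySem

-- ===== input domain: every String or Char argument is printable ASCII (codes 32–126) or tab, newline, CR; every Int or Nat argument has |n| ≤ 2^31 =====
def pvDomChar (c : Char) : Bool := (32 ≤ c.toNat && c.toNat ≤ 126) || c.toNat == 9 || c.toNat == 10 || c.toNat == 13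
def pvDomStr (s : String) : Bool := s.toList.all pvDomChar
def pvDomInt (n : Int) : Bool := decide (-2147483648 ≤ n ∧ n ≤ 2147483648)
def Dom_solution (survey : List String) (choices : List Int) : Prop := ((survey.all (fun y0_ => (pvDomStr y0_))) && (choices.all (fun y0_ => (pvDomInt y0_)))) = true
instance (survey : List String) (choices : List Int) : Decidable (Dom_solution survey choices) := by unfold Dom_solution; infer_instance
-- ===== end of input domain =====

-- B replaces A's streaming accumulation (eight elif branches updating four signed scores)
-- by counting: each axis's net is a closed-form weighted sum of occurrence counts of the
-- 14 possible (code, choice) pairs in the zipped input; objective: alternative.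

-- ===== PORT A =====
-- Python's score returns None outside 1..7 (a TypeError as soon as it is used); Pre_ excludes
-- those inputs, so the 0 returned here is never relied on.
def score (n : Int) : Int :=
  if n = 1 then 3
  else if n = 2 then 2
  else if n = 3 then 1
  else if n = 4 then 0
  else if n = 5 then -1
  else if n = 6 then -2
  else if n = 7 then -3
  else 0

-- the body of A's for-loop (branches in A's order); choices[i] is read eagerly here, which is
-- indistinguishable in total Lean from A's conditional read (Pre_ excludes the raising inputs)
def coreA (s : String) (c : Int) (st : Int × Int × Int × Int) : Int × Int × Int × Int :=
  if s = "RT" then (st.1 + score c, st.2.1, st.2.2.1, st.2.2.2)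
  else if s = "TR" then (st.1 - score c, st.2.1, st.2.2.1, st.2.2.2)
  else if s = "CF" then (st.1, st.2.1 + score c, st.2.2.1, st.2.2.2)
  else if s = "FC" then (st.1, st.2.1 - score c, st.2.2.1, st.2.2.2)
  else if s = "JM" then (st.1, st.2.1, st.2.2.1 + score c, st.2.2.2)
  else if s = "MJ" then (st.1, st.2.1, st.2.2.1 - score c, st.2.2.2)
  else if s = "AN" then (st.1, st.2.1, st.2.2.1, st.2.2.2 + score c)
  else if s = "NA" then (st.1, st.2.1, st.2.2.1, st.2.2.2 - score c)
  else st

def solution (survey : List String) (choices : List Int) : String :=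
  let RTFCMJAN := (PySem.List.pyRange 0 (PySem.List.len survey) 1).foldl
    (fun st i => coreA (PySem.List.pyGetD survey i "") (PySem.List.pyGetD choices i 0) st)
    (0, 0, 0, 0)
  "" ++ (if RTFCMJAN.1 ≥ 0 then "R" else "T")
     ++ (if RTFCMJAN.2.1 ≥ 0 then "C" else "F")
     ++ (if RTFCMJAN.2.2.1 ≥ 0 then "J" else "M")
     ++ (if RTFCMJAN.2.2.2 ≥ 0 then "A" else "N")

-- ===== PORT B =====
-- net(qa, ab, ba): the axis's net score as a weighted sum of counts of (code, choice) pairs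
def netB (qa : List (String × Int)) (ab ba : String) : Int :=
  (PySem.List.pyRange 1 8 1).foldl
    (fun acc ch =>
      acc + (((PySem.List.count qa (ab, ch)) : Int) - ((PySem.List.count qa (ba, ch)) : Int)) * (4 - ch))
    0

def solution_alt (survey : List String) (choices : List Int) : String :=
  let qa := survey.zip choices
  ([("RT", "TR", "R", "T"), ("CF", "FC", "C", "F"),
    ("JM", "MJ", "J", "M"), ("AN", "NA", "A", "N")]).foldl
    (fun answer q => answer ++ (if netB qa q.1 q.2.1 ≥ 0 then q.2.2.1 else q.2.2.2)) ""

-- ===== PRECONDITION & SPEC =====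
def isCode (s : String) : Bool :=
  s == "RT" || s == "TR" || s == "CF" || s == "FC" || s == "JM" || s == "MJ" || s == "AN" || s == "NA"

-- Pre_ excludes exactly the inputs where A raises: a recognised survey code at an index with no
-- choice (IndexError) or with a choice outside 1..7 (score returns None, then TypeError).
def Pre_solution (survey : List String) (choices : List Int) : Prop :=
  ∀ i : Nat, i < survey.length → isCode (survey.getD i "") = true →
    i < choices.length ∧ 1 ≤ choices.getD i 0 ∧ choices.getD i 0 ≤ 7

instance (survey : List String) (choices : List Int) : Decidable (Pre_solution survey choices) := by
  unfold Pre_solution; infer_instance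

def pvWitness_solution : List String × List Int := (["RT", "xx", "NA", "CF"], [1, 9, 4, 7])

def Spec_solution (survey : List String) (choices : List Int) (out : String) : Prop :=
  out = solution_alt survey choices
instance (survey : List String) (choices : List Int) (out : String) : Decidable (Spec_solution survey choices out) := by
  unfold Spec_solution; infer_instance

-- ===== CLAIM (what is proved, stated in full; the proofs are below) =====
def Claim_equal_solution : Prop := ∀ (survey : List String) (choices : List Int), Dom_solution survey choices → Pre_solution survey choices → Spec_solution survey choices (solution survey choices)

-- ===== LEMMAS AND PROOFS =====

lemma score_eq (c : Int) (h1 : 1 ≤ c) (h7 : c ≤ 7) : score c = 4 - c := by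
  unfold score; split_ifs <;> omega

lemma isCode_cases (s : String) (h : isCode s = true) :
    s = "RT" ∨ s = "TR" ∨ s = "CF" ∨ s = "FC" ∨ s = "JM" ∨ s = "MJ" ∨ s = "AN" ∨ s = "NA" := by
  simpa [isCode, or_assoc] using h

lemma coreA_invalid (s : String) (c : Int) (st : Int × Int × Int × Int)
    (h : isCode s = false) : coreA s c st = st := by
  simp only [isCode, Bool.or_eq_false_iff, beq_eq_false_iff_ne, ne_eq] at h
  obtain ⟨⟨⟨⟨⟨⟨⟨h1, h2⟩, h3⟩, h4⟩, h5⟩, h6⟩, h7⟩, h8⟩ := h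
  simp [coreA, h1, h2, h3, h4, h5, h6, h7, h8]

lemma netB_nil (ab ba : String) : netB [] ab ba = 0 := rfl

-- a question whose code touches neither letter pair leaves that axis's counts unchanged
lemma netB_cons_ne (s : String) (c : Int) (qa : List (String × Int)) (ab ba : String)
    (hab : s ≠ ab) (hba : s ≠ ba) : netB ((s, c) :: qa) ab ba = netB qa ab ba := by
  simp [netB, PySem.List.count_eq, Prod.mk.injEq, hab, hba,
    show PySem.List.pyRange 1 8 1 = [1, 2, 3, 4, 5, 6, 7] from rfl]

-- a forward-code question with choice c adds (4 - c) to its axis's net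
lemma netB_cons_pos (c : Int) (qa : List (String × Int)) (ab ba : String)
    (h1 : 1 ≤ c) (h7 : c ≤ 7) (hne : ab ≠ ba) :
    netB ((ab, c) :: qa) ab ba = netB qa ab ba + (4 - c) := by
  interval_cases c <;>
    simp [netB, PySem.List.count_eq, List.count_cons, beq_iff_eq, Prod.mk.injEq, hne,
      show PySem.List.pyRange 1 8 1 = [1, 2, 3, 4, 5, 6, 7] from rfl] <;>
    ring

-- a reverse-code question with choice c subtracts (4 - c) from its axis's net
lemma netB_cons_neg (c : Int) (qa : List (String × Int)) (ab ba : String)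
    (h1 : 1 ≤ c) (h7 : c ≤ 7) (hne : ab ≠ ba) :
    netB ((ba, c) :: qa) ab ba = netB qa ab ba - (4 - c) := by
  have hne' : ba ≠ ab := hne.symm
  interval_cases c <;>
    simp [netB, PySem.List.count_eq, List.count_cons, beq_iff_eq, Prod.mk.injEq, hne',
      show PySem.List.pyRange 1 8 1 = [1, 2, 3, 4, 5, 6, 7] from rfl] <;>
    ring

-- one step of A's loop changes each accumulator by exactly the head's change to B's net counts
lemma step_delta (s : String) (c : Int) (st : Int × Int × Int × Int) (qa : List (String × Int))
    (hc : isCode s = true → 1 ≤ c ∧ c ≤ 7) :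
    coreA s c st =
      (st.1 + (netB ((s, c) :: qa) "RT" "TR" - netB qa "RT" "TR"),
       st.2.1 + (netB ((s, c) :: qa) "CF" "FC" - netB qa "CF" "FC"),
       st.2.2.1 + (netB ((s, c) :: qa) "JM" "MJ" - netB qa "JM" "MJ"),
       st.2.2.2 + (netB ((s, c) :: qa) "AN" "NA" - netB qa "AN" "NA")) := by
  cases hv : isCode s with
  | false =>
    rw [coreA_invalid s c st hv]
    simp only [isCode, Bool.or_eq_false_iff, beq_eq_false_iff_ne, ne_eq] at hv
    obtain ⟨⟨⟨⟨⟨⟨⟨h1, h2⟩, h3⟩, h4⟩, h5⟩, h6⟩, h7⟩, h8⟩ := hv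
    rw [netB_cons_ne s c qa "RT" "TR" h1 h2, netB_cons_ne s c qa "CF" "FC" h3 h4,
      netB_cons_ne s c qa "JM" "MJ" h5 h6, netB_cons_ne s c qa "AN" "NA" h7 h8]
    simp
  | true =>
    obtain ⟨hc1, hc7⟩ := hc hv
    have hs := score_eq c hc1 hc7
    rcases isCode_cases s hv with h' | h' | h' | h' | h' | h' | h' | h' <;> subst h'
    · rw [netB_cons_pos c qa "RT" "TR" hc1 hc7 (by decide),
          netB_cons_ne "RT" c qa "CF" "FC" (by decide) (by decide),
          netB_cons_ne "RT" c qa "JM" "MJ" (by decide) (by decide),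
          netB_cons_ne "RT" c qa "AN" "NA" (by decide) (by decide)]
      simp [coreA, hs]
    · rw [netB_cons_neg c qa "RT" "TR" hc1 hc7 (by decide),
          netB_cons_ne "TR" c qa "CF" "FC" (by decide) (by decide),
          netB_cons_ne "TR" c qa "JM" "MJ" (by decide) (by decide),
          netB_cons_ne "TR" c qa "AN" "NA" (by decide) (by decide)]
      simp [coreA, hs, Prod.ext_iff]; omega
    · rw [netB_cons_ne "CF" c qa "RT" "TR" (by decide) (by decide),
          netB_cons_pos c qa "CF" "FC" hc1 hc7 (by decide),
          netB_cons_ne "CF" c qa "JM" "MJ" (by decide) (by decide),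
          netB_cons_ne "CF" c qa "AN" "NA" (by decide) (by decide)]
      simp [coreA, hs]
    · rw [netB_cons_ne "FC" c qa "RT" "TR" (by decide) (by decide),
          netB_cons_neg c qa "CF" "FC" hc1 hc7 (by decide),
          netB_cons_ne "FC" c qa "JM" "MJ" (by decide) (by decide),
          netB_cons_ne "FC" c qa "AN" "NA" (by decide) (by decide)]
      simp [coreA, hs, Prod.ext_iff]; omega
    · rw [netB_cons_ne "JM" c qa "RT" "TR" (by decide) (by decide),
          netB_cons_ne "JM" c qa "CF" "FC" (by decide) (by decide),
          netB_cons_pos c qa "JM" "MJ" hc1 hc7 (by decide),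
          netB_cons_ne "JM" c qa "AN" "NA" (by decide) (by decide)]
      simp [coreA, hs]
    · rw [netB_cons_ne "MJ" c qa "RT" "TR" (by decide) (by decide),
          netB_cons_ne "MJ" c qa "CF" "FC" (by decide) (by decide),
          netB_cons_neg c qa "JM" "MJ" hc1 hc7 (by decide),
          netB_cons_ne "MJ" c qa "AN" "NA" (by decide) (by decide)]
      simp [coreA, hs, Prod.ext_iff]; omega
    · rw [netB_cons_ne "AN" c qa "RT" "TR" (by decide) (by decide),
          netB_cons_ne "AN" c qa "CF" "FC" (by decide) (by decide),
          netB_cons_ne "AN" c qa "JM" "MJ" (by decide) (by decide),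
          netB_cons_pos c qa "AN" "NA" hc1 hc7 (by decide)]
      simp [coreA, hs]
    · rw [netB_cons_ne "NA" c qa "RT" "TR" (by decide) (by decide),
          netB_cons_ne "NA" c qa "CF" "FC" (by decide) (by decide),
          netB_cons_ne "NA" c qa "JM" "MJ" (by decide) (by decide),
          netB_cons_neg c qa "AN" "NA" hc1 hc7 (by decide)]
      simp [coreA, hs, Prod.ext_iff]; omega

-- A's whole loop, started at st, ends at st plus B's per-axis net counts of the zipped input
lemma loop_eq : ∀ (survey : List String) (choices : List Int) (st : Int × Int × Int × Int),
    (∀ i : Nat, i < survey.length → isCode (survey.getD i "") = true →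
      i < choices.length ∧ 1 ≤ choices.getD i 0 ∧ choices.getD i 0 ≤ 7) →
    (List.range survey.length).foldl
        (fun st k => coreA (survey.getD k "") (choices.getD k 0) st) st =
      (st.1 + netB (survey.zip choices) "RT" "TR",
       st.2.1 + netB (survey.zip choices) "CF" "FC",
       st.2.2.1 + netB (survey.zip choices) "JM" "MJ",
       st.2.2.2 + netB (survey.zip choices) "AN" "NA") := by
  intro survey
  induction survey with
  | nil => intro choices st _; simp [netB_nil]
  | cons s ss ih =>
    intro choices st hpre
    rw [show (s :: ss).length = ss.length + 1 from rfl, List.range_succ_eq_map,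
        List.foldl_cons, List.foldl_map]
    cases choices with
    | nil =>
      have hinv : isCode s = false := by
        cases hv : isCode s with
        | false => rfl
        | true => exact absurd (hpre 0 (by simp) (by simpa using hv)).1 (by simp)
      simp only [List.getD_cons_zero, List.getD_nil, coreA_invalid s 0 st hinv,
        List.zip_nil_right, netB_nil]
      have := ih [] st (fun i hi hcode => by
        have := hpre (i + 1) (by simpa using hi) (by simpa using hcode)
        simp at this)
      simpa [netB_nil] using this
    | cons c cs =>
      simp only [List.getD_cons_zero, List.getD_cons_succ, List.zip_cons_cons]
      have hc : isCode s = true → 1 ≤ c ∧ c ≤ 7 := fun hv => by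
        have := hpre 0 (by simp) (by simpa using hv)
        simpa using this.2
      have := ih cs (coreA s c st) (fun i hi hcode => by
        have := hpre (i + 1) (by simpa using hi) (by simpa using hcode)
        simpa using this)
      rw [this, step_delta s c st (ss.zip cs) hc]
      simp only [Prod.ext_iff]
      refine ⟨by omega, by omega, by omega, by omega⟩

-- ===== VERDICT (by name: the statement is the Claim_ definition above) =====
theorem solution_spec : Claim_equal_solution := by
  intro survey choices _ hpre
  unfold Spec_solution solution solution_alt
  rw [PySem.List.pyRange_one]
  simp only [PySem.List.len, Int.sub_zero, Int.toNat_natCast, List.foldl_map, zero_add,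
    PySem.List.pyGetD_natCast]
  rw [loop_eq survey choices (0, 0, 0, 0) hpre]
  simp only [List.foldl_cons, List.foldl_nil, zero_add]
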